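-- pv_equiv track=rewrite | github.com/CentreForDigitalHumanities/programming-in-python | solutions/09 String manipulation solutions.py | bwian_speech
-- ===== SOURCE A (Python) =====
-- def bwian_speech(text):
--     """ Replace the first occurrence of 'r' after every comma by 'w'.
--
--     Recognizes uppercase 'R' as well, and replaces only the first
--     occurrence of either 'r' or 'R'. """
--     # We first split the text in chunks between commas. The first chunk
--     # is at the start of the text, the other chunks follow a comma.
--     comma_chunks = text.split(',')
--     # We make a new list of chunks that we will rejoin with commas at the end.
--     # Since the first chunk is before any comma, we can already copy it.
--     output_chunks = comma_chunks[:1]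
--     # Now, we loop over the remaining chunks in order to replace
--     # first occurrences of 'r' or 'R'.
--     for chunk in comma_chunks[1:]:
--         # We split the chunk into at most two parts:
--         # one before the first 'r' and maybe one after it.
--         r_chunks = chunk.split('r', 1)
--         # However, we do not know yet whether that 'r' should be replaced
--         # by a 'w', because there might be a 'R' before it. To find out,
--         # we simply try to replace such an 'R' and then compare.
--         R_replaced = r_chunks[0].replace('R', 'W', 1)
--         if R_replaced == r_chunks[0]:
--             # Nothing changed, so 'R' was not in the first chunk.
--             # We now know that we should be replacing the first 'r'.
--             output_chunks.append('w'.join(r_chunks))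
--         else:
--             # We already replaced the first 'R' by 'W', so we should not
--             # replace any 'r' after it by 'w'.
--             r_chunks[0] = R_replaced
--             output_chunks.append('r'.join(r_chunks))
--     # At this point, we have a list of chunks that all have their first
--     # occurrence or 'r' or 'R' replaced. All that is left to do is to
--     # glue them back together with commas.
--     return ','.join(output_chunks)
-- ===== SOURCE B (Python) =====
-- def bwian_speech(text):
--     """ Replace the first occurrence of 'r' after every comma by 'w'.
--
--     Recognizes uppercase 'R' as well, and replaces only the first
--     occurrence of either 'r' or 'R'. """
--     out = []
--     pending = False
--     for c in text:
--         if c == ',':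
--             out.append(c)
--             pending = True
--         elif pending and c in ('r', 'R'):
--             out.append('w' if c == 'r' else 'W')
--             pending = False
--         else:
--             out.append(c)
--     return ''.join(out)
-- ===== Notes on version B (the rewrite author's own statement) =====
-- stated objective: simpler
-- what changed: Replaced the split/try-replace/compare/rejoin chunk pipeline by a single left-to-right character scan with a pending flag set at each comma and cleared at the first following 'r'/'R'.
import Mathlib
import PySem

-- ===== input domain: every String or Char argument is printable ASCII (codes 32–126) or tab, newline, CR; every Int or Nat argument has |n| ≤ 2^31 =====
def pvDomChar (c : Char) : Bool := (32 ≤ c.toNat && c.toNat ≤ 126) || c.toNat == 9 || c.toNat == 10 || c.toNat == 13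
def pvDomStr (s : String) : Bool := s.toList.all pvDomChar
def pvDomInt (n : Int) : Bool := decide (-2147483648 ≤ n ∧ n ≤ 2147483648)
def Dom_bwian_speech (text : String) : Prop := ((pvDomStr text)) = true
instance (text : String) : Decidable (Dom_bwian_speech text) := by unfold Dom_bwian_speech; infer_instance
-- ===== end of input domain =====

-- B replaces A's split/try-replace/compare/rejoin chunk pipeline by one character scan with a pending flag (same cost, simpler).


-- ===== PORT A =====
-- hand port of s.replace('R', 'W', 1): exact for a single-char old/new with count 1 (PySem.Chars.replace has no count)
def replRW1 : List Char → List Char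
  | [] => []
  | c :: t => if c = 'R' then 'W' :: t else c :: replRW1 t

-- the body of A's for-loop: process one chunk that follows a comma
def procChunkA (chunk : List Char) : List Char :=
  let rChunks := PySem.Chars.splitOnMax chunk ['r'] 1      -- chunk.split('r', 1)
  match rChunks with
  | [] => []                                               -- unreachable: split always returns ≥ 1 piece
  | r0 :: rest =>
    let rReplaced := replRW1 r0                            -- r_chunks[0].replace('R', 'W', 1)
    if rReplaced = r0 then
      PySem.Chars.join ['w'] (r0 :: rest)                  -- 'w'.join(r_chunks)
    else
      PySem.Chars.join ['r'] (rReplaced :: rest)           -- 'r'.join(r_chunks) after r_chunks[0] = R_replaced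

def bwian_speech (text : String) : String :=
  let commaChunks := PySem.Chars.splitOn text.toList [',']                 -- text.split(',')
  let outputChunks := PySem.List.slice commaChunks none (some 1)           -- comma_chunks[:1]
  let outputChunks := (PySem.List.slice commaChunks (some 1) none).foldl   -- for chunk in comma_chunks[1:]
      (fun out chunk => out ++ [procChunkA chunk]) outputChunks            --   output_chunks.append(...)
  String.ofList (PySem.Chars.join [','] outputChunks)                          -- ','.join(output_chunks)

-- ===== PORT B =====
-- one scan: pending is set at each ',' and cleared at the first 'r'/'R' after it
def scanB : Bool → List Char → List Char
  | _, [] => []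
  | pending, c :: t =>
    if c = ',' then c :: scanB true t
    else if pending && (c = 'r' || c = 'R') then
      (if c = 'r' then 'w' else 'W') :: scanB false t
    else c :: scanB pending t

def bwian_speech_alt (text : String) : String :=
  String.ofList (scanB false text.toList)

-- ===== PRECONDITION & SPEC =====
def Spec_bwian_speech (text : String) (out : String) : Prop := out = bwian_speech_alt text
instance (text : String) (out : String) : Decidable (Spec_bwian_speech text out) := by unfold Spec_bwian_speech; infer_instance

-- ===== CLAIM (what is proved, stated in full; the proofs are below) =====
def Claim_equal_bwian_speech : Prop := ∀ (text : String), Dom_bwian_speech text → Spec_bwian_speech text (bwian_speech text)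

-- ===== LEMMAS AND PROOFS =====

-- specification-side split on ',': (head chunk, chunks after each comma)
def splitC : List Char → List Char × List (List Char)
  | [] => ([], [])
  | c :: t =>
    let p := splitC t
    if c = ',' then ([], p.1 :: p.2) else (c :: p.1, p.2)

-- specification-side split('r', 1): (part before the first 'r', rest if an 'r' was found)
def splitR1 : List Char → List Char × Option (List Char)
  | [] => ([], none)
  | c :: t =>
    if c = 'r' then ([], some t)
    else
      let p := splitR1 t
      (c :: p.1, p.2)

-- replace the first 'r' or 'R' (whichever comes first) by 'w' / 'W'
def repl1 : List Char → List Char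
  | [] => []
  | c :: t => if c = 'r' then 'w' :: t else if c = 'R' then 'W' :: t else c :: repl1 t

theorem splitOn_go_step (fuel : Nat) (c : Char) (t cur : List Char) (acc : List (List Char)) :
    PySem.Chars.splitOn.go [','] (fuel+1) (c::t) cur acc =
      if c = ',' then PySem.Chars.splitOn.go [','] fuel t [] (cur.reverse :: acc)
      else PySem.Chars.splitOn.go [','] fuel t (c :: cur) acc := by
  rw [PySem.Chars.splitOn.go]
  by_cases h : c = ','
  · simp [h, List.isPrefixOf]
  · simp only [List.isPrefixOf, Bool.and_true, if_neg h]
    rw [if_neg]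
    simp [beq_iff_eq, Ne.symm h]

theorem splitOn_go_comma (l : List Char) : ∀ (fuel : Nat) (cur : List Char) (acc : List (List Char)),
    l.length ≤ fuel →
    PySem.Chars.splitOn.go [','] fuel l cur acc
      = acc.reverse ++ (cur.reverse ++ (splitC l).1) :: (splitC l).2 := by
  induction l with
  | nil =>
    intro fuel cur acc _
    cases fuel <;> simp [PySem.Chars.splitOn.go, splitC]
  | cons c t ih =>
    intro fuel cur acc hf
    cases fuel with
    | zero => simp at hf
    | succ f =>
      rw [splitOn_go_step]
      by_cases h : c = ','
      · rw [if_pos h, ih f [] (cur.reverse :: acc) (by simpa using hf)]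
        simp [h, splitC]
      · rw [if_neg h, ih f (c :: cur) acc (by simpa using hf)]
        simp [h, splitC]

theorem splitOn_comma (l : List Char) :
    PySem.Chars.splitOn l [','] = (splitC l).1 :: (splitC l).2 := by
  rw [PySem.Chars.splitOn, splitOn_go_comma l (l.length + 1) [] [] (by omega)]
  simp

theorem splitOnMax_go_zero (fuel : Nat) (l cur : List Char) (acc : List (List Char)) :
    PySem.Chars.splitOnMax.go ['r'] fuel 0 l cur acc = acc.reverse ++ [cur.reverse ++ l] := by
  cases fuel <;> cases l <;> simp [PySem.Chars.splitOnMax.go]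

theorem splitOnMax_go_step (fuel : Nat) (c : Char) (t cur : List Char) (acc : List (List Char)) :
    PySem.Chars.splitOnMax.go ['r'] (fuel+1) 1 (c::t) cur acc =
      if c = 'r' then PySem.Chars.splitOnMax.go ['r'] fuel 0 t [] (cur.reverse :: acc)
      else PySem.Chars.splitOnMax.go ['r'] fuel 1 t (c :: cur) acc := by
  rw [PySem.Chars.splitOnMax.go]
  by_cases h : c = 'r'
  · simp [h, List.isPrefixOf]
  · simp [List.isPrefixOf, Ne.symm h, h]

theorem splitOnMax_go_one (l : List Char) : ∀ (fuel : Nat) (cur : List Char) (acc : List (List Char)),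
    l.length ≤ fuel →
    PySem.Chars.splitOnMax.go ['r'] fuel 1 l cur acc
      = acc.reverse ++ (cur.reverse ++ (splitR1 l).1) ::
          (match (splitR1 l).2 with | none => [] | some s => [s]) := by
  induction l with
  | nil =>
    intro fuel cur acc _
    cases fuel <;> simp [PySem.Chars.splitOnMax.go, splitR1]
  | cons c t ih =>
    intro fuel cur acc hf
    cases fuel with
    | zero => simp at hf
    | succ f =>
      rw [splitOnMax_go_step]
      by_cases h : c = 'r'
      · rw [if_pos h, splitOnMax_go_zero]
        simp [h, splitR1]
      · rw [if_neg h, ih f (c :: cur) acc (by simpa using hf)]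
        simp [h, splitR1]

theorem splitOnMax_one (l : List Char) :
    PySem.Chars.splitOnMax l ['r'] 1
      = (splitR1 l).1 :: (match (splitR1 l).2 with | none => [] | some s => [s]) := by
  rw [PySem.Chars.splitOnMax]
  rw [if_neg (by omega)]
  rw [show ((1:Int).toNat) = 1 from rfl, splitOnMax_go_one l (l.length + 1) [] [] (by omega)]
  simp

theorem join_rejoin_splitR1 (t : List Char) :
    PySem.Chars.join ['r'] ((splitR1 t).1 :: (match (splitR1 t).2 with | none => [] | some s => [s])) = t := by
  induction t with
  | nil => simp [splitR1, PySem.Chars.join, List.intercalate]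
  | cons c u ih =>
    by_cases h : c = 'r'
    · simp [splitR1, h, PySem.Chars.join, List.intercalate]
    · cases ho : (splitR1 u).2 <;>
        simp_all [splitR1, PySem.Chars.join, List.intercalate]

theorem procChunkA_eq_repl1 (chunk : List Char) : procChunkA chunk = repl1 chunk := by
  induction chunk with
  | nil => simp [procChunkA, splitOnMax_one, splitR1, replRW1, repl1, PySem.Chars.join, List.intercalate]
  | cons c t ih =>
    by_cases hr : c = 'r'
    · simp [procChunkA, splitOnMax_one, splitR1, hr, replRW1, repl1, PySem.Chars.join, List.intercalate]
    · by_cases hR : c = 'R'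
      · have hj := join_rejoin_splitR1 t
        simp [procChunkA, splitOnMax_one, splitR1, hR, replRW1, repl1, PySem.Chars.join,
          List.intercalate] at hj ⊢
        cases ho : (splitR1 t).2 <;> simp_all
      · have hA := ih
        simp only [procChunkA, splitOnMax_one, splitR1, if_neg hr] at hA ⊢
        simp only [replRW1, if_neg hR]
        by_cases he : replRW1 (splitR1 t).1 = (splitR1 t).1
        · cases ho : (splitR1 t).2 <;>
            simp_all [repl1, PySem.Chars.join, List.intercalate]
        · cases ho : (splitR1 t).2 <;>
            simp_all [repl1, PySem.Chars.join, List.intercalate]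

theorem join_cons_char (sep : List Char) (c : Char) (h : List Char) (rest : List (List Char)) :
    PySem.Chars.join sep ((c :: h) :: rest) = c :: PySem.Chars.join sep (h :: rest) := by
  cases rest <;> simp [PySem.Chars.join, List.intercalate]

theorem scanB_eq (l : List Char) :
    scanB false l = PySem.Chars.join [','] ((splitC l).1 :: (splitC l).2.map repl1)
    ∧ scanB true l = PySem.Chars.join [','] (repl1 (splitC l).1 :: (splitC l).2.map repl1) := by
  induction l with
  | nil => simp [scanB, splitC, PySem.Chars.join, List.intercalate, repl1]
  | cons c t ih =>
    obtain ⟨ihf, iht⟩ := ih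
    by_cases hc : c = ','
    · constructor <;>
        simp [scanB, hc, splitC, iht, PySem.Chars.join, List.intercalate, repl1]
    · have hsp : splitC (c :: t) = (c :: (splitC t).1, (splitC t).2) := by
        simp [splitC, hc]
      by_cases hr : c = 'r'
      · constructor
        · rw [show scanB false (c :: t) = c :: scanB false t by simp [scanB, hc],
            hsp, join_cons_char, ihf]
        · rw [show scanB true (c :: t) = 'w' :: scanB false t by simp [scanB, hr],
            hsp, show repl1 (c :: (splitC t).1) = 'w' :: (splitC t).1 by simp [repl1, hr],
            join_cons_char, ihf]
      · by_cases hR : c = 'R'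
        · constructor
          · rw [show scanB false (c :: t) = c :: scanB false t by simp [scanB, hc],
              hsp, join_cons_char, ihf]
          · rw [show scanB true (c :: t) = 'W' :: scanB false t by simp [scanB, hR],
              hsp, show repl1 (c :: (splitC t).1) = 'W' :: (splitC t).1 by rw [repl1, if_neg hr, if_pos hR],
              join_cons_char, ihf]
        · constructor
          · rw [show scanB false (c :: t) = c :: scanB false t by simp [scanB, hc],
              hsp, join_cons_char, ihf]
          · rw [show scanB true (c :: t) = c :: scanB true t by simp [scanB, hc, hr, hR],
              hsp, show repl1 (c :: (splitC t).1) = c :: repl1 (splitC t).1 by simp [repl1, hr, hR],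
              join_cons_char, iht]

-- ===== VERDICT (by name: the statement is the Claim_ definition above) =====
theorem bwian_speech_spec : Claim_equal_bwian_speech := by
  intro text _
  unfold Spec_bwian_speech bwian_speech bwian_speech_alt
  dsimp only
  rw [splitOn_comma,
    show PySem.List.slice ((splitC text.toList).1 :: (splitC text.toList).2) none (some 1)
        = [(splitC text.toList).1] from by simp [PySem.List.slice],
    show PySem.List.slice ((splitC text.toList).1 :: (splitC text.toList).2) (some 1) none
        = (splitC text.toList).2 from by simp [PySem.List.slice],
    PySem.List.foldl_append_singleton_eq_map,
    List.map_congr_left (fun c _ => procChunkA_eq_repl1 c),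
    (scanB_eq text.toList).1]
  rfl
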